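-- pv_equiv track=rewrite | github.com/DCAN-Labs/abcd-bids-tfmri-pipeline | run_sbatch_jobs.py | get_script_sub_ses_and_task_from_cmd
-- ===== SOURCE A (Python) =====
-- def get_script_sub_ses_and_task_from_cmd(cmd_parts):
--     """
--     :param cmd_parts: List of string parts of complete command calling pipeline
--     :return: Dictionary mapping each of several pipeline .py script flags
--              to the index of its value in split_cmd
--     """
--     flags_to_find = ['-subject', '-ses', '-task']
--     flags_found = dict()
--     for cmd_ix in range(len(cmd_parts)):
--         each_flag = cmd_parts[cmd_ix]
--         if 'script' not in flags_found and each_flag[-2:] == '.py':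
--             flags_found['script'] = cmd_ix
--         for each_flag in flags_to_find:
--             if cmd_parts[cmd_ix][-len(each_flag):] == each_flag:
--                 flags_to_find.pop(flags_to_find.index(each_flag))
--                 flags_found[each_flag[1:]] = cmd_ix + 1
--     return flags_found
-- ===== SOURCE B (Python) =====
-- # Per-flag independent first-index scans merged by index, instead of A's single
-- # interleaved pass that mutates its pending-flag list mid-iteration.
-- # Note: A's 'script' test compares 2 chars with '.py' (3 chars) and is always False,
-- # so the function never records a 'script' key; B therefore scans only for the flags.
-- def _first_index_endswith(parts, suffix):
--     for i, part in enumerate(parts):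
--         if part.endswith(suffix):
--             return i
--     return None
--
-- def get_script_sub_ses_and_task_from_cmd(cmd_parts):
--     entries = []
--     for flag in ('-subject', '-ses', '-task'):
--         ix = _first_index_endswith(cmd_parts, flag)
--         if ix is not None:
--             entries.append((ix, flag[1:], ix + 1))
--     entries.sort(key=lambda e: e[0])
--     return {key: val for _, key, val in entries}
-- ===== Notes on version B (the rewrite author's own statement) =====
-- stated objective: alternative
-- what changed: B finds each flag's first index by an independent scan per flag and merges the (index,key,value) entries with a sort to reproduce dict insertion order, instead of A's single interleaved pass that mutates the pending-flag list while iterating over it; since A's script test `each_flag[-2:] == '.py'` is dead (always False), B simply has no script scan.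
import Mathlib
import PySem

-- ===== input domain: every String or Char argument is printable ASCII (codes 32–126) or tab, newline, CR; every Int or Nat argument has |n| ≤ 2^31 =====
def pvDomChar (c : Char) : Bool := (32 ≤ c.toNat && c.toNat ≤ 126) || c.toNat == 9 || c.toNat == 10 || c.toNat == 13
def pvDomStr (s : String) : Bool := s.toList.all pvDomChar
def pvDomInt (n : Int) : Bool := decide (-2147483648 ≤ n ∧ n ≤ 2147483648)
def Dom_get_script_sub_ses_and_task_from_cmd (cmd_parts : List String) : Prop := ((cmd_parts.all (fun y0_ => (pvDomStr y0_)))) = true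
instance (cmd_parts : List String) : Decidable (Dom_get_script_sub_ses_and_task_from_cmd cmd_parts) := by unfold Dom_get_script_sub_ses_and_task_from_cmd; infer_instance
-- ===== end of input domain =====

-- B replaces A's single interleaved pass (which mutates the pending-flag list mid-iteration) by one
-- independent first-index scan per flag, merged by a sort on the match index to reproduce insertion order.


-- ===== PORT A =====
-- the test cmd_parts[cmd_ix][-len(each_flag):] == each_flag
def pvMatchesA (p f : String) : Bool :=
  PySem.Str.slice p (some (-(PySem.Str.len f : Int))) none == f

-- the inner `for each_flag in flags_to_find:` loop; Python iterates by position j over the list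
-- it mutates with .pop(.index(each_flag)), so j advances by 1 each step over the CURRENT list.
-- The loop ends when j reaches the (current) length; `fuel`, initially the number of positions left,
-- only makes the recursion structural and never runs out before that.
def pvInnerAGo (p : String) (i : Int) :
    Nat → List String → PySem.Dict String Int → Nat → List String × PySem.Dict String Int
  | 0, ftf, found, _ => (ftf, found)
  | fuel + 1, ftf, found, j =>
    if h : j < ftf.length then
      let f := ftf[j]
      if pvMatchesA p f then
        let ftf' := match PySem.List.index? ftf f with
          | some k =>
            match PySem.List.pop? ftf (k : Int) with
            | some r => r.2
            | none => ftf          -- unreachable (index is in range); keeps the port total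
          | none => ftf            -- unreachable (f ∈ ftf); keeps the port total
        pvInnerAGo p i fuel ftf' (PySem.Dict.insert found (PySem.Str.slice f (some 1) none) (i + 1)) (j + 1)
      else
        pvInnerAGo p i fuel ftf found (j + 1)
    else (ftf, found)

def pvInnerA (p : String) (i : Int) (ftf : List String) (found : PySem.Dict String Int) (j : Nat) :
    List String × PySem.Dict String Int :=
  pvInnerAGo p i (ftf.length - j) ftf found j

def pvLoopA (parts : List String) (i : Int) (ftf : List String) (found : PySem.Dict String Int) :
    PySem.Dict String Int :=
  match parts with
  | [] => found
  | p :: rest =>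
    let found1 := if (PySem.Dict.contains found "script" = false)
                      ∧ (PySem.Str.slice p (some (-2)) none == ".py") = true
                  then PySem.Dict.insert found "script" i else found
    let r := pvInnerA p i ftf found1 0
    pvLoopA rest (i + 1) r.1 r.2

def get_script_sub_ses_and_task_from_cmd (cmd_parts : List String) : List (String × Int) :=
  (pvLoopA cmd_parts 0 ["-subject", "-ses", "-task"] PySem.Dict.empty).items

-- ===== PORT B =====
-- _first_index_endswith(parts, suffix): the enumerate loop, carrying the running index
def pvFirstIdxEndsWith (parts : List String) (suffix : String) (i : Nat) : Option Nat :=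
  match parts with
  | [] => none
  | p :: rest =>
    if PySem.Str.endswith p suffix then some i else pvFirstIdxEndsWith rest suffix (i + 1)

def get_script_sub_ses_and_task_from_cmd_alt (cmd_parts : List String) : List (String × Int) :=
  let entries := ["-subject", "-ses", "-task"].foldl (fun acc flag =>
      match pvFirstIdxEndsWith cmd_parts flag 0 with
      | some ix => acc ++ [(ix, PySem.Str.slice flag (some 1) none, (ix : Int) + 1)]
      | none => acc) []
  (PySem.List.sorted entries (fun e => e.1)).map (fun e => (e.2.1, e.2.2))

-- ===== PRECONDITION & SPEC =====
def Spec_get_script_sub_ses_and_task_from_cmd (cmd_parts : List String) (out : List (String × Int)) : Prop :=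
  out = get_script_sub_ses_and_task_from_cmd_alt cmd_parts
instance (cmd_parts : List String) (out : List (String × Int)) : Decidable (Spec_get_script_sub_ses_and_task_from_cmd cmd_parts out) := by
  unfold Spec_get_script_sub_ses_and_task_from_cmd; infer_instance

-- ===== CLAIM =====
def Claim_equal_get_script_sub_ses_and_task_from_cmd : Prop := ∀ (cmd_parts : List String), Dom_get_script_sub_ses_and_task_from_cmd cmd_parts → Spec_get_script_sub_ses_and_task_from_cmd cmd_parts (get_script_sub_ses_and_task_from_cmd cmd_parts)

-- ===== LEMMAS AND PROOFS =====
-- generic: xs[-|ys|:] == ys  is  "ys is a suffix of xs"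
lemma drop_sub_len_eq_iff {α : Type} (xs ys : List α) :
    xs.drop (xs.length - ys.length) = ys ↔ ys <:+ xs := by
  constructor
  · intro h
    exact h ▸ List.drop_suffix _ _
  · rintro ⟨a, rfl⟩
    simp

lemma matches_eq_endswith (p f : String) (h : 0 < f.toList.length) :
    pvMatchesA p f = PySem.Str.endswith p f := by
  rw [Bool.eq_iff_iff]
  rw [pvMatchesA, beq_iff_eq, ← String.toList_inj]
  have hlen : (PySem.Str.len f : Int) = ((f.toList.length : Nat) : Int) := by
    simp [PySem.Str.len_eq]
  have hl : (PySem.Str.slice p (some (-(PySem.Str.len f : Int))) none).toList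
      = p.toList.drop (p.toList.length - f.toList.length) := by
    simp only [PySem.Str.toList_slice, PySem.Chars.slice_eq_listSlice, hlen]
    exact PySem.List.slice_from_neg_natCast _ _ h
  rw [hl, drop_sub_len_eq_iff]
  rw [PySem.Str.endswith_eq]
  exact (PySem.Chars.endswith_iff _ _).symm

-- A's script test compares a 2-char slice with the 3-char '.py': always false
lemma script_test_false (p : String) :
    (PySem.Str.slice p (some (-2)) none == ".py") = false := by
  by_contra h
  have h2 : PySem.Str.slice p (some (-2)) none = ".py" := by
    revert h; cases hb : (PySem.Str.slice p (some (-2)) none == ".py") with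
    | false => intro h; exact absurd rfl h
    | true => intro _; exact eq_of_beq hb
  have := congrArg (fun s => s.toList.length) h2
  simp only [PySem.Str.toList_slice, PySem.Chars.slice_eq_listSlice] at this
  rw [PySem.List.slice_from_neg_ofNat p.toList 2 (by omega)] at this
  simp at this
  omega

def pvFlags0 : List String := ["-subject", "-ses", "-task"]
def pvTail (f : String) : String := PySem.Str.slice f (some 1) none

lemma ends_suffix {p f : String} (h : PySem.Str.endswith p f = true) : f.toList <:+ p.toList := by
  rw [PySem.Str.endswith_eq] at h
  exact (PySem.Chars.endswith_iff _ _).mp h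

lemma ends_unique (p : String) {f g : String} (hf : f ∈ pvFlags0) (hg : g ∈ pvFlags0)
    (h1 : PySem.Str.endswith p f = true) (h2 : PySem.Str.endswith p g = true) : f = g := by
  have s1 := ends_suffix h1
  have s2 := ends_suffix h2
  fin_cases hf <;> fin_cases hg <;> first
    | rfl
    | exact absurd (List.suffix_of_suffix_length_le s1 s2 (by decide)) (by decide)
    | exact absurd (List.suffix_of_suffix_length_le s2 s1 (by decide)) (by decide)

lemma flags_len {f : String} (hf : f ∈ pvFlags0) : 0 < f.toList.length := by
  fin_cases hf <;> decide

lemma tail_inj {f g : String} (hf : f ∈ pvFlags0) (hg : g ∈ pvFlags0)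
    (h : pvTail f = pvTail g) : f = g := by
  fin_cases hf <;> fin_cases hg <;> first | rfl | (exfalso; revert h; decide)

lemma not_mem_take_of_nodup {l : List String} (h : l.Nodup) {j : Nat} (hj : j < l.length) :
    l[j] ∉ l.take j := by
  intro hmem
  obtain ⟨i, hi, hget⟩ := List.getElem_of_mem hmem
  have hij : i < j := by
    have := hi; simp at this; omega
  rw [List.getElem_take] at hget
  exact absurd ((List.Nodup.getElem_inj_iff h).mp hget) (by omega)

lemma index?_getElem_of_nodup {l : List String} (h : l.Nodup) {j : Nat} (hj : j < l.length) :
    PySem.List.index? l l[j] = some j := by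
  rw [PySem.List.index?_eq_some_iff]
  exact ⟨l.take j, l.drop (j + 1),
    by rw [← List.drop_eq_getElem_cons hj, List.take_append_drop],
    by simp [Nat.le_of_lt hj],
    not_mem_take_of_nodup h hj⟩

lemma innerAGo_none (p : String) (i : Int) :
    ∀ (fuel : Nat) (ftf : List String) (found : PySem.Dict String Int) (j : Nat),
    (∀ f ∈ ftf, f ∈ pvFlags0) →
    (∀ f ∈ ftf.drop j, PySem.Str.endswith p f = false) →
    pvInnerAGo p i fuel ftf found j = (ftf, found) := by
  intro fuel
  induction fuel with
  | zero => intro ftf found j _ _; rfl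
  | succ fuel ih =>
    intro ftf found j hsub hno
    show pvInnerAGo p i (fuel + 1) ftf found j = _
    rw [pvInnerAGo]
    split
    · next h =>
      have hd := List.drop_eq_getElem_cons h
      have hmem : ftf[j] ∈ ftf.drop j := by rw [hd]; exact List.mem_cons_self
      have hm : pvMatchesA p ftf[j] = false := by
        rw [matches_eq_endswith _ _ (flags_len (hsub _ (List.getElem_mem h)))]
        exact hno _ hmem
      simp only [hm, Bool.false_eq_true, if_false]
      exact ih ftf found (j + 1) hsub (fun f hf => hno f (by rw [hd]; exact List.mem_cons_of_mem _ hf))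
    · rfl

lemma innerAGo_spec (p : String) (i : Int) :
    ∀ (fuel : Nat) (ftf : List String) (found : PySem.Dict String Int) (j : Nat),
    ftf.length - j ≤ fuel →
    ftf.Nodup →
    (∀ f ∈ ftf, f ∈ pvFlags0) →
    pvInnerAGo p i fuel ftf found j =
      match (ftf.drop j).find? (fun f => PySem.Str.endswith p f) with
      | some f => (ftf.erase f, PySem.Dict.insert found (PySem.Str.slice f (some 1) none) (i + 1))
      | none => (ftf, found) := by
  intro fuel
  induction fuel with
  | zero =>
    intro ftf found j hfuel _ _
    have : ftf.drop j = [] := List.drop_eq_nil_of_le (by omega)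
    rw [this]
    rfl
  | succ fuel ih =>
    intro ftf found j hfuel hnd hsub
    show pvInnerAGo p i (fuel + 1) ftf found j = _
    rw [pvInnerAGo]
    split
    · next h =>
      have hd := List.drop_eq_getElem_cons h
      cases hm : PySem.Str.endswith p ftf[j] with
      | true =>
        have hmA : pvMatchesA p ftf[j] = true := by
          rw [matches_eq_endswith _ _ (flags_len (hsub _ (List.getElem_mem h)))]; exact hm
        have herase : ftf.eraseIdx j = ftf.erase ftf[j] := (List.Nodup.erase_getElem hnd j h).symm
        simp only [hmA, if_true, index?_getElem_of_nodup hnd h]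
        rw [PySem.List.pop?_natCast ftf j h]
        dsimp only
        rw [herase]
        rw [innerAGo_none p i fuel _ _ _
          (fun f hf => hsub _ (List.erase_subset hf))
          (fun f hf => by
            have hf' : f ∈ ftf.erase ftf[j] := List.mem_of_mem_drop hf
            have hpair := (List.Nodup.mem_erase_iff hnd).mp hf'
            cases he : PySem.Str.endswith p f with
            | false => rfl
            | true => exact absurd (ends_unique p (hsub _ hpair.2) (hsub _ (List.getElem_mem h)) he hm) hpair.1)]
        rw [hd]
        simp only [List.find?_cons, hm]
      | false =>
        have hmA : pvMatchesA p ftf[j] = false := by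
          rw [matches_eq_endswith _ _ (flags_len (hsub _ (List.getElem_mem h)))]; exact hm
        simp only [hmA, Bool.false_eq_true, if_false]
        rw [ih ftf found (j + 1) (by omega) hnd hsub]
        rw [hd]
        simp only [List.find?_cons, hm]
    · next h =>
      have : ftf.drop j = [] := List.drop_eq_nil_of_le (by omega)
      rw [this]
      rfl

-- canonical single-pass result, proof-only
def pvC3 : List String → Nat → List String → List (Nat × String × Int)
  | [], _, _ => []
  | p :: rest, n, ftf =>
    match ftf.find? (fun f => PySem.Str.endswith p f) with
    | some f => (n, pvTail f, (n : Int) + 1) :: pvC3 rest (n + 1) (ftf.erase f)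
    | none => pvC3 rest (n + 1) ftf

lemma loopA_items : ∀ (parts : List String) (n : Nat) (ftf : List String) (found : PySem.Dict String Int),
    ftf.Nodup → (∀ f ∈ ftf, f ∈ pvFlags0) →
    (∀ f ∈ ftf, found.contains (pvTail f) = false) →
    (pvLoopA parts (n : Int) ftf found).items
      = found.items ++ (pvC3 parts n ftf).map (fun e => (e.2.1, e.2.2)) := by
  intro parts
  induction parts with
  | nil => intro n ftf found _ _ _; simp [pvLoopA, pvC3]
  | cons p rest ih =>
    intro n ftf found hnd hsub hfree
    rw [pvLoopA]
    simp only [pvInnerA]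
    rw [if_neg (by simp [script_test_false p])]
    rw [pvC3]
    have hspec := innerAGo_spec p (n : Int) (ftf.length - 0) ftf found 0 (by omega) hnd hsub
    simp only [List.drop_zero] at hspec
    cases hfind : ftf.find? (fun f => PySem.Str.endswith p f) with
    | none =>
      rw [hfind] at hspec
      simp only [hspec]
      have : ((n : Int) + 1) = ((n + 1 : Nat) : Int) := by push_cast; ring
      rw [this, ih (n + 1) ftf found hnd hsub hfree]
    | some f =>
      rw [hfind] at hspec
      simp only [hspec]
      have hfmem : f ∈ ftf := List.mem_of_find?_eq_some hfind
      have hcast : ((n : Int) + 1) = ((n + 1 : Nat) : Int) := by push_cast; ring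
      rw [hcast, ih (n + 1) (ftf.erase f) (PySem.Dict.insert found (PySem.Str.slice f (some 1) none) (((n + 1 : Nat)) : Int))
        (hnd.erase f)
        (fun g hg => hsub _ (List.erase_subset hg))
        (fun g hg => by
          have hpair := (List.Nodup.mem_erase_iff hnd).mp hg
          rw [PySem.Dict.contains_insert]
          have hne : (pvTail g == PySem.Str.slice f (some 1) none) = false := by
            cases hbe : pvTail g == PySem.Str.slice f (some 1) none with
            | false => rfl
            | true => exact absurd (tail_inj (hsub _ hpair.2) (hsub _ hfmem) (eq_of_beq hbe)) hpair.1
          rw [hne, hfree g hpair.2]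
          rfl)]
      rw [show PySem.Str.slice f (some 1) none = pvTail f from rfl,
        PySem.Dict.items_insert_of_not_contains found _ (hfree f hfmem)]
      simp

-- B's entry for one flag, starting the scan at index n (proof-only)
def pvEnt (parts : List String) (n : Nat) (f : String) : List (Nat × String × Int) :=
  match pvFirstIdxEndsWith parts f n with
  | some ix => [(ix, pvTail f, (ix : Int) + 1)]
  | none => []

lemma C3_key_ge : ∀ (parts : List String) (n : Nat) (ftf : List String) (e : Nat × String × Int),
    e ∈ pvC3 parts n ftf → n ≤ e.1 := by
  intro parts
  induction parts with
  | nil => intro n ftf e h; simp [pvC3] at h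
  | cons p rest ih =>
    intro n ftf e h
    rw [pvC3] at h
    cases hfind : ftf.find? (fun f => PySem.Str.endswith p f) with
    | none =>
      rw [hfind] at h
      have := ih (n + 1) ftf e h
      omega
    | some f =>
      rw [hfind] at h
      rcases List.mem_cons.mp h with h1 | h2
      · rw [h1]
      · have := ih (n + 1) (ftf.erase f) e h2
        omega

lemma C3_pairwise : ∀ (parts : List String) (n : Nat) (ftf : List String),
    (pvC3 parts n ftf).Pairwise (fun a b => a.1 < b.1) := by
  intro parts
  induction parts with
  | nil => intro n ftf; simp [pvC3]
  | cons p rest ih =>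
    intro n ftf
    rw [pvC3]
    cases hfind : ftf.find? (fun f => PySem.Str.endswith p f) with
    | none => exact ih (n + 1) ftf
    | some f =>
      refine List.pairwise_cons.mpr ⟨fun e he => ?_, ih (n + 1) (ftf.erase f)⟩
      have := C3_key_ge rest (n + 1) (ftf.erase f) e he
      omega

lemma C3_perm : ∀ (parts : List String) (n : Nat) (ftf : List String),
    ftf.Nodup → (∀ f ∈ ftf, f ∈ pvFlags0) →
    (ftf.flatMap (pvEnt parts n)).Perm (pvC3 parts n ftf) := by
  intro parts
  induction parts with
  | nil =>
    intro n ftf _ _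
    rw [pvC3, List.flatMap_congr (g := fun _ => ([] : List (Nat × String × Int)))
      (fun f _ => by rw [pvEnt]; rfl)]
    simp
  | cons p rest ih =>
    intro n ftf hnd hsub
    rw [pvC3]
    cases hfind : ftf.find? (fun f => PySem.Str.endswith p f) with
    | none =>
      have hall := List.find?_eq_none.mp hfind
      rw [List.flatMap_congr (g := pvEnt rest (n + 1)) (fun f hf => by
        rw [pvEnt, pvEnt, pvFirstIdxEndsWith]
        rw [if_neg (by simp [Bool.not_eq_true] at hall ⊢; exact hall f hf)])]
      exact ih (n + 1) ftf hnd hsub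
    | some f =>
      have hfmem : f ∈ ftf := List.mem_of_find?_eq_some hfind
      have hp : PySem.Str.endswith p f = true := by
        have := List.find?_some hfind; simpa using this
      have hperm1 : (ftf.flatMap (pvEnt (p :: rest) n)).Perm
          ((f :: ftf.erase f).flatMap (pvEnt (p :: rest) n)) :=
        List.Perm.flatMap_right _ (List.perm_cons_erase hfmem)
      refine hperm1.trans ?_
      rw [List.flatMap_cons]
      have hef : pvEnt (p :: rest) n f = [(n, pvTail f, (n : Int) + 1)] := by
        rw [pvEnt, pvFirstIdxEndsWith, if_pos hp]
      rw [hef]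
      rw [List.flatMap_congr (g := pvEnt rest (n + 1)) (fun g hg => by
        have hpair := (List.Nodup.mem_erase_iff hnd).mp hg
        have hg0 : PySem.Str.endswith p g = false := by
          cases he : PySem.Str.endswith p g with
          | false => rfl
          | true => exact absurd (ends_unique p (hsub _ hpair.2) (hsub _ hfmem) he hp) hpair.1
        rw [pvEnt, pvEnt, pvFirstIdxEndsWith, if_neg (by
          simp [PySem.Str.endswith_eq] at hg0; simp [hg0])])]
      simp only [List.singleton_append]
      exact List.Perm.cons _ (ih (n + 1) (ftf.erase f) (hnd.erase f)
        (fun g hg => hsub _ (List.erase_subset hg)))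

lemma foldl_body_eq (cmd_parts : List String) :
    (fun (acc : List (Nat × String × Int)) flag =>
      match pvFirstIdxEndsWith cmd_parts flag 0 with
      | some ix => acc ++ [(ix, PySem.Str.slice flag (some 1) none, (ix : Int) + 1)]
      | none => acc)
    = (fun acc flag => acc ++ pvEnt cmd_parts 0 flag) := by
  funext acc flag
  rw [pvEnt]
  cases pvFirstIdxEndsWith cmd_parts flag 0 with
  | some ix => rfl
  | none => exact (List.append_nil acc).symm

lemma A_eq (parts : List String) :
    get_script_sub_ses_and_task_from_cmd parts = (pvC3 parts 0 pvFlags0).map (fun e => (e.2.1, e.2.2)) := by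
  have h := loopA_items parts 0 pvFlags0 PySem.Dict.empty (by decide) (fun f hf => hf)
    (fun f _ => by rfl)
  simpa [get_script_sub_ses_and_task_from_cmd, pvFlags0] using h

lemma entries_eq (parts : List String) :
    (["-subject", "-ses", "-task"].foldl (fun acc flag =>
      match pvFirstIdxEndsWith parts flag 0 with
      | some ix => acc ++ [(ix, PySem.Str.slice flag (some 1) none, (ix : Int) + 1)]
      | none => acc) [])
    = pvFlags0.flatMap (pvEnt parts 0) := by
  rw [foldl_body_eq parts]
  exact PySem.List.foldl_append_eq_flatMap _ _ _

lemma B_eq (parts : List String) :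
    get_script_sub_ses_and_task_from_cmd_alt parts = (pvC3 parts 0 pvFlags0).map (fun e => (e.2.1, e.2.2)) := by
  rw [get_script_sub_ses_and_task_from_cmd_alt]
  rw [entries_eq parts]
  rw [PySem.List.sorted_eq_of_perm_of_pairwise_lt _ _ _
    (by simpa using (C3_perm parts 0 pvFlags0 (by decide) (fun f hf => hf)).symm)
    (C3_pairwise parts 0 pvFlags0)]

-- ===== VERDICT (by name: the statement is the Claim_ definition above) =====
theorem get_script_sub_ses_and_task_from_cmd_spec : Claim_equal_get_script_sub_ses_and_task_from_cmd := by
  intro parts _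
  show get_script_sub_ses_and_task_from_cmd parts = get_script_sub_ses_and_task_from_cmd_alt parts
  rw [A_eq, B_eq]
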